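-- pv_equiv track=rewrite | github.com/yeoeol/Algo | 백준/Silver/23304. 아카라카/아카라카.py | is_akaraka
-- ===== SOURCE A (Python) =====
-- def is_akaraka(string):
--     if len(string) == 1:
--         return True
--
--     if string != string[::-1]:
--         return False
--
--     n = len(string)
--     prefix = string[:n//2]
--
--     return is_akaraka(prefix)
-- ===== SOURCE B (Python) =====
-- def is_akaraka(string):
--     # Check every halving-prefix for palindromicity by two-pointer index
--     # comparisons against the original string: no slices, no reversed copies,
--     # only the current prefix length m is maintained.
--     m = len(string)
--     while m > 1:
--         for i in range(m // 2):
--             if string[i] != string[m - 1 - i]: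
--                 return False
--         m //= 2
--     return True
-- ===== Notes on version B (the rewrite author's own statement) =====
-- stated objective: alternative
-- what changed: Instead of recursing on a freshly sliced prefix and comparing it with its reversed copy, B iterates only over the prefix LENGTH m and verifies each halving prefix palindromic by two-pointer index comparisons on the original string, building no intermediate strings.
-- outside the precondition, e.g. on is_akaraka(''): A raises RecursionError, B returns True
import Mathlib
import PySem

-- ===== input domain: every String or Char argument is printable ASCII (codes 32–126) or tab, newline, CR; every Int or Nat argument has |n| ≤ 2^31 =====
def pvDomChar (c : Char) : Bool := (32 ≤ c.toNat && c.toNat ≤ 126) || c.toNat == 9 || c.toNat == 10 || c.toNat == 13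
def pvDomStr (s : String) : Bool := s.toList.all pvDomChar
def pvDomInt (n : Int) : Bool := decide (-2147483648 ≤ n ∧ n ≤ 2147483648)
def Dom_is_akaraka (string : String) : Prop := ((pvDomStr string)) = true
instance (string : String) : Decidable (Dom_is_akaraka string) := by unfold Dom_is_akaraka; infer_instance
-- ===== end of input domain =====

-- B checks each halving prefix by two-pointer index comparisons on the original string,
-- tracking only the prefix length, instead of A's recursion on sliced-and-reversed copies.

-- ===== PORT A =====
-- A's recursion on the code points (s[::-1] is List.reverse, s[:n//2] is take (n/2)).
-- Fuel (initial length + 1) only makes the recursion total: one unit per halving always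
-- suffices on the nonempty strings Pre_ admits (A diverges on "").
def akarakaRecA : Nat → List Char → Bool
  | 0, _ => true
  | fuel + 1, l =>
    if l.length == 1 then true
    else if l ≠ l.reverse then false
    else akarakaRecA fuel (l.take (l.length / 2))

def is_akaraka (string : String) : Bool := akarakaRecA (string.toList.length + 1) string.toList

-- ===== PORT B =====
-- B's inner 'for i in range(m//2)' over the original characters (getD: indices are in range).
def palScanB (l : List Char) (m i : Nat) : Bool :=
  if _h : i < m / 2 then
    if l.getD i ' ' ≠ l.getD (m - 1 - i) ' ' then false
    else palScanB l m (i + 1)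
  else true
termination_by m / 2 - i

-- B's outer 'while m > 1' loop over the prefix length only; fuel as for A.
def akarakaLenB (l : List Char) : Nat → Nat → Bool
  | 0, _ => true
  | fuel + 1, m =>
    if 1 < m then
      if palScanB l m 0 then akarakaLenB l fuel (m / 2) else false
    else true

def is_akaraka_alt (string : String) : Bool :=
  akarakaLenB string.toList (string.toList.length + 1) string.toList.length

-- ===== PRECONDITION & SPEC =====
-- Pre_ excludes only the empty string, on which A's recursion raises RecursionError.
def Pre_is_akaraka (string : String) : Prop := string ≠ ""
instance (string : String) : Decidable (Pre_is_akaraka string) := by unfold Pre_is_akaraka; infer_instance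
def pvWitness_is_akaraka : String := "abba"

def Spec_is_akaraka (string : String) (out : Bool) : Prop := out = is_akaraka_alt string
instance (string : String) (out : Bool) : Decidable (Spec_is_akaraka string out) := by unfold Spec_is_akaraka; infer_instance

-- ===== CLAIM (what is proved, stated in full; the proofs are below) =====
def Claim_equal_is_akaraka : Prop := ∀ (string : String), Dom_is_akaraka string → Pre_is_akaraka string → Spec_is_akaraka string (is_akaraka string)

-- ===== LEMMAS AND PROOFS =====

-- palScanB scans indices j with i ≤ j < m/2 and succeeds iff all mirror pairs agree.
theorem palScanB_iff_aux (l : List Char) (m : Nat) : ∀ (k i : Nat), m / 2 - i ≤ k →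
    (palScanB l m i = true ↔ ∀ j, i ≤ j → j < m / 2 → l.getD j ' ' = l.getD (m - 1 - j) ' ') := by
  intro k
  induction k with
  | zero =>
    intro i hi
    rw [palScanB, dif_neg (by omega)]
    exact iff_of_true rfl fun j h1 h2 => absurd h2 (by omega)
  | succ k ih =>
    intro i hi
    rw [palScanB]
    by_cases h : i < m / 2
    · rw [dif_pos h]
      by_cases hc : l.getD i ' ' = l.getD (m - 1 - i) ' '
      · rw [if_neg (by simpa using hc), ih (i + 1) (by omega)]
        constructor
        · intro hall j h1 h2
          rcases Nat.eq_or_lt_of_le h1 with he | hl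
          · exact he ▸ hc
          · exact hall j hl h2
        · intro hall j h1 h2
          exact hall j (by omega) h2
      · rw [if_pos (by simpa using hc)]
        exact iff_of_false (by simp) fun hall => hc (hall i le_rfl h)
    · rw [dif_neg h]
      exact iff_of_true rfl fun j h1 h2 => absurd h2 (by omega)

theorem palScanB_iff (l : List Char) (m : Nat) :
    (palScanB l m 0 = true ↔ ∀ j, j < m / 2 → l.getD j ' ' = l.getD (m - 1 - j) ' ') := by
  rw [palScanB_iff_aux l m (m / 2) 0 (by omega)]
  constructor
  · intro h j hj; exact h j (Nat.zero_le j) hj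
  · intro h j _ hj; exact h j hj

-- getD of a reversed list, index in range
theorem getD_rev (t : List Char) (i : Nat) (h : i < t.length) :
    t.reverse.getD i ' ' = t.getD (t.length - 1 - i) ' ' := by
  rw [List.getD_eq_getElem t.reverse ' ' (by simpa using h),
      List.getD_eq_getElem t ' ' (by omega), List.getElem_reverse]

-- A list is its own reverse iff all mirror pairs in its first half agree.
theorem pal_iff (t : List Char) :
    (t = t.reverse) ↔ (∀ i, i < t.length / 2 → t.getD i ' ' = t.getD (t.length - 1 - i) ' ') := by
  constructor
  · intro h i hi
    calc t.getD i ' ' = t.reverse.getD i ' ' := by rw [← h]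
    _ = t.getD (t.length - 1 - i) ' ' := getD_rev t i (by omega)
  · intro h
    apply List.ext_getElem (by simp)
    intro i h1 h2
    rw [← List.getD_eq_getElem t ' ' h1, ← List.getD_eq_getElem t.reverse ' ' h2, getD_rev t i h1]
    by_cases hc : i < t.length / 2
    · exact h i hc
    · by_cases hc2 : t.length - 1 - i < t.length / 2
      · have := h _ hc2
        rw [show t.length - 1 - (t.length - 1 - i) = i by omega] at this
        exact this.symm
      · rw [show t.length - 1 - i = i by omega]

theorem getD_take (l : List Char) (m j : Nat) (h : j < m) :
    (l.take m).getD j ' ' = l.getD j ' ' := by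
  simp [List.getD, h]

-- the palindrome test A performs on the prefix l.take m equals B's index scan
theorem pal_take_iff_scan (l : List Char) (m : Nat) (hm : m ≤ l.length) :
    (l.take m = (l.take m).reverse) ↔ palScanB l m 0 = true := by
  have hlen : (l.take m).length = m := by simp [hm]
  rw [pal_iff, palScanB_iff, hlen]
  constructor
  · intro h j hj
    have := h j hj
    rwa [getD_take l m j (by omega), getD_take l m (m - 1 - j) (by omega)] at this
  · intro h j hj
    rw [getD_take l m j (by omega), getD_take l m (m - 1 - j) (by omega)]
    exact h j hj

theorem recA_eq_lenB (l : List Char) : ∀ (fuel m : Nat), 1 ≤ m → m ≤ l.length →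
    akarakaRecA fuel (l.take m) = akarakaLenB l fuel m := by
  intro fuel
  induction fuel with
  | zero => intro m _ _; rfl
  | succ f ih =>
    intro m h1 h2
    have hlen : (l.take m).length = m := by simp [h2]
    rw [akarakaRecA, akarakaLenB]
    by_cases hm : m = 1
    · rw [if_pos (by rw [hlen, hm]; decide), if_neg (by omega)]
    · have hgt : 1 < m := by omega
      rw [if_neg (by rw [hlen]; simpa using hm), if_pos hgt]
      by_cases hp : l.take m = (l.take m).reverse
      · have hscan : palScanB l m 0 = true := (pal_take_iff_scan l m h2).mp hp
        rw [if_neg (not_not.mpr hp), if_pos hscan, hlen, List.take_take]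
        have hmin : min (m / 2) m = m / 2 := by omega
        rw [hmin]
        exact ih (m / 2) (by omega) (by omega)
      · have hscan : ¬ palScanB l m 0 = true := fun h => hp ((pal_take_iff_scan l m h2).mpr h)
        rw [if_pos hp, if_neg hscan]

-- ===== VERDICT (by name: the statement is the Claim_ definition above) =====
theorem is_akaraka_spec : Claim_equal_is_akaraka := by
  intro s _ hpre
  unfold Spec_is_akaraka is_akaraka is_akaraka_alt
  have hne : s.toList ≠ [] := fun h => hpre (String.toList_eq_nil_iff.mp h)
  have hlen : 1 ≤ s.toList.length := by
    have := List.length_pos_iff.mpr hne; omega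
  have := recA_eq_lenB s.toList (s.toList.length + 1) s.toList.length hlen le_rfl
  rwa [List.take_length] at this
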